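-- pv_equiv track=rewrite | github.com/makerdao/evm | decompile.py | get_jumpdests
-- ===== SOURCE A (Python) =====
-- def get_jumpdests(lines):
--     jumpdests = []
--     for i, bytes in enumerate(lines):
--         if bytes[0] == '5b':
--             length = 0
--             for bytes in lines[:i]:
--                 length += len(bytes)
--             location = hex(length)[2:]
--             if len(location) % 2 != 0:
--                 location = '0' + location
--             elements = [location[i:i+2] for i in range(len(location)) if i % 2 == 0]
--             if len(elements) > 2:
--                 raise ValueError('3-byte jumpdests not supported')
--             jumpdests.append(elements)
--     return jumpdests
-- ===== SOURCE B (Python) =====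
-- def get_jumpdests(lines):
--     # prefix-offset table: offsets[i] = total byte length of lines[:i]
--     offsets = [0]
--     for line in lines:
--         offsets.append(offsets[-1] + len(line))
--     jumpdests = []
--     for i, line in enumerate(lines):
--         if line[0] == '5b':
--             n = offsets[i]
--             if n > 0xffff:
--                 raise ValueError('3-byte jumpdests not supported')
--             if n > 0xff:
--                 jumpdests.append(['%02x' % (n // 256), '%02x' % (n % 256)])
--             else:
--                 jumpdests.append(['%02x' % n])
--     return jumpdests
-- ===== Notes on version B (the rewrite author's own statement) =====
-- stated objective: alternative
-- what changed: B builds a prefix-offset table once and formats each jumpdest offset directly as its high/low byte with '%02x' arithmetic, instead of A's re-scan of lines[:i] for every jumpdest and hex-string padding/chunking.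
import Mathlib
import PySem

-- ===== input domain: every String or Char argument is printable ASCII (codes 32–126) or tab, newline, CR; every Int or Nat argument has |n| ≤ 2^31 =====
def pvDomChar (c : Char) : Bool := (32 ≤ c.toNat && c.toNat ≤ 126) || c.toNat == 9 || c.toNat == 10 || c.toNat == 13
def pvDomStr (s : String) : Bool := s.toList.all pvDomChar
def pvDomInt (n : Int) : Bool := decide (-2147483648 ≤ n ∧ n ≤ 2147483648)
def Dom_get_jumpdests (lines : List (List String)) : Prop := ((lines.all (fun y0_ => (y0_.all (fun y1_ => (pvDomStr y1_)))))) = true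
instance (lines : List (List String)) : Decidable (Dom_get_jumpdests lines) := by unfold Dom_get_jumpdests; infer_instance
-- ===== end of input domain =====

-- B builds a prefix-offset table once and formats each jumpdest offset directly as its
-- high/low byte ('%02x' arithmetic), instead of A's per-jumpdest re-scan of lines[:i]
-- and hex-string padding/chunking.

-- ===== PORT A =====
-- hex(n)[2:] for n ≥ 0 (lowercase hex digits, "0" for 0)
def pvHexChars (n : Nat) : List Char :=
  if h : n < 16 then [Nat.digitChar n]
  else pvHexChars (n / 16) ++ [Nat.digitChar (n % 16)]
decreasing_by exact Nat.div_lt_self (by omega) (by omega)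

-- the body of A's 'for i, bytes in enumerate(lines)' loop
def pvStepA (lines : List (List String)) (jumpdests : List (List String))
    (iv : Int × List String) : List (List String) :=
  if PySem.List.pyGetD iv.2 0 "" = "5b" then
    -- length = 0; for bytes in lines[:i]: length += len(bytes)
    let length := (PySem.List.slice lines none (some iv.1)).foldl (fun acc b => acc + b.length) 0
    let location := pvHexChars length
    let location := if location.length % 2 ≠ 0 then '0' :: location else location
    let elements := ((List.range location.length).filter (fun j => j % 2 = 0)).map
        (fun j => String.mk ((location.drop j).take 2))
    if elements.length > 2 then jumpdests   -- Python raises ValueError here; outside Pre_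
    else jumpdests ++ [elements]
  else jumpdests

def get_jumpdests (lines : List (List String)) : List (List String) :=
  (PySem.List.enumerate lines 0).foldl (pvStepA lines) []

-- ===== PORT B =====
-- '%02x' % n for n < 256
def pvByte2 (n : Nat) : String :=
  String.mk (if n < 16 then '0' :: pvHexChars n else pvHexChars n)

-- the body of B's 'for i, line in enumerate(lines)' loop
def pvStepB (offsets : List Nat) (jumpdests : List (List String))
    (iv : Int × List String) : List (List String) :=
  if PySem.List.pyGetD iv.2 0 "" = "5b" then
    let n := PySem.List.pyGetD offsets iv.1 0
    if n > 65535 then jumpdests   -- Python raises ValueError here; outside Pre_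
    else if n > 255 then jumpdests ++ [[pvByte2 (n / 256), pvByte2 (n % 256)]]
    else jumpdests ++ [[pvByte2 n]]
  else jumpdests

def get_jumpdests_alt (lines : List (List String)) : List (List String) :=
  let offsets := lines.foldl
    (fun acc line => acc ++ [PySem.List.pyGetD acc (-1) 0 + line.length]) [0]
  (PySem.List.enumerate lines 0).foldl (pvStepB offsets) []

-- ===== PRECONDITION & SPEC =====
-- Pre_ excludes exactly the inputs on which Python A raises: an IndexError when some
-- instruction line is the empty list (bytes[0]), and a ValueError when a '5b' line sits
-- at a byte offset needing more than two bytes (≥ 0x10000).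
def Pre_get_jumpdests (lines : List (List String)) : Prop :=
  (∀ l ∈ lines, l ≠ []) ∧
  ∀ i, i < lines.length → (lines.getD i []).getD 0 "" = "5b" →
    ((lines.take i).map List.length).sum < 65536
instance (lines : List (List String)) : Decidable (Pre_get_jumpdests lines) := by
  unfold Pre_get_jumpdests; infer_instance

def pvWitness_get_jumpdests : List (List String) := [["5b"], ["00", "01"], ["5b"]]

def Spec_get_jumpdests (lines : List (List String)) (out : List (List String)) : Prop := out = get_jumpdests_alt lines
instance (lines : List (List String)) (out : List (List String)) : Decidable (Spec_get_jumpdests lines out) := by unfold Spec_get_jumpdests; infer_instance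

-- ===== CLAIM (what is proved, stated in full; the proofs are below) =====
def Claim_equal_get_jumpdests : Prop := ∀ (lines : List (List String)), Dom_get_jumpdests lines → Pre_get_jumpdests lines → Spec_get_jumpdests lines (get_jumpdests lines)

-- ===== LEMMAS AND PROOFS =====

-- reference forms of the two loops: one pass carrying the running byte offset
def pvScan (s : Nat) : List (List String) → List Nat
  | [] => []
  | l :: ls => (s + l.length) :: pvScan (s + l.length) ls

def pvEmitA (s : Nat) : List (List String) :=
  let location := pvHexChars s
  let location := if location.length % 2 ≠ 0 then '0' :: location else location
  let elements := ((List.range location.length).filter (fun j => j % 2 = 0)).map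
      (fun j => String.mk ((location.drop j).take 2))
  if elements.length > 2 then [] else [elements]

def pvEmitB (s : Nat) : List (List String) :=
  if s > 65535 then []
  else if s > 255 then [[pvByte2 (s / 256), pvByte2 (s % 256)]]
  else [[pvByte2 s]]

def pvRef (emit : Nat → List (List String)) (s : Nat) : List (List String) → List (List String)
  | [] => []
  | l :: ls => (if PySem.List.pyGetD l 0 "" = "5b" then emit s else []) ++ pvRef emit (l.length + s) ls

lemma pvScan_getD (ls : List (List String)) (s i : Nat) (h : i ≤ ls.length) :
    (s :: pvScan s ls).getD i 0 = s + ((ls.take i).map List.length).sum := by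
  induction ls generalizing s i with
  | nil =>
    simp only [List.length_nil, Nat.le_zero] at h
    subst h; simp
  | cons l ls ih =>
    cases i with
    | zero => simp
    | succ i =>
      simp only [pvScan, List.getD_cons_succ, List.take_succ_cons, List.map_cons, List.sum_cons]
      have := ih (s + l.length) i (by simpa using h)
      simp only [List.getD] at this ⊢
      rw [this]; ring

lemma pvOffsets_eq (ls : List (List String)) :
    ∀ (pre : List Nat) (h : pre ≠ []),
      ls.foldl (fun acc line => acc ++ [PySem.List.pyGetD acc (-1) 0 + line.length]) pre
        = pre ++ pvScan (pre.getLast h) ls := by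
  induction ls with
  | nil => intro pre h; simp [pvScan]
  | cons l ls ih =>
    intro pre h
    simp only [List.foldl_cons]
    rw [PySem.List.pyGetD_neg_one pre 0 h]
    rw [ih (pre ++ [pre.getLast h + l.length]) (by simp)]
    simp [pvScan]

lemma pvRange_filter_even_len (L : Nat) :
    ((List.range L).filter (fun j => j % 2 = 0)).length = (L + 1) / 2 := by
  induction L with
  | zero => simp
  | succ L ih =>
    rw [List.range_succ, List.filter_append, List.length_append, ih]
    by_cases h : L % 2 = 0 <;> simp [h] <;> omega

lemma pvHex_small (n : Nat) (h : n < 16) : pvHexChars n = [Nat.digitChar n] := by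
  rw [pvHexChars]; simp [h]

lemma pvHex_big (n : Nat) (h : ¬ n < 16) :
    pvHexChars n = pvHexChars (n / 16) ++ [Nat.digitChar (n % 16)] := by
  rw [pvHexChars]; simp [h]

lemma pvHex2 (n : Nat) (h1 : 16 ≤ n) (h2 : n < 256) :
    pvHexChars n = [Nat.digitChar (n / 16), Nat.digitChar (n % 16)] := by
  rw [pvHex_big n (by omega), pvHex_small (n / 16) (by omega)]; rfl

lemma pvHex3 (n : Nat) (h1 : 256 ≤ n) (h2 : n < 4096) :
    pvHexChars n = [Nat.digitChar (n / 256), Nat.digitChar (n / 16 % 16), Nat.digitChar (n % 16)] := by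
  rw [pvHex_big n (by omega), pvHex2 (n / 16) (by omega) (by omega)]
  have h3 : n / 16 / 16 = n / 256 := by omega
  rw [h3]; rfl

lemma pvHex4 (n : Nat) (h1 : 4096 ≤ n) (h2 : n < 65536) :
    pvHexChars n = [Nat.digitChar (n / 4096), Nat.digitChar (n / 256 % 16),
      Nat.digitChar (n / 16 % 16), Nat.digitChar (n % 16)] := by
  rw [pvHex_big n (by omega), pvHex3 (n / 16) (by omega) (by omega)]
  have h3 : n / 16 / 256 = n / 4096 := by omega
  have h4 : n / 16 / 16 % 16 = n / 256 % 16 := by omega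
  rw [h3, h4]; rfl

lemma pvHexLen_ge (k : Nat) : ∀ n : Nat, 16 ^ k ≤ n → k + 1 ≤ (pvHexChars n).length := by
  induction k with
  | zero =>
    intro n _
    by_cases h : n < 16
    · rw [pvHex_small n h]; simp
    · rw [pvHex_big n h]; simp
  | succ k ih =>
    intro n hn
    have h16 : ¬ n < 16 := by
      intro h
      have : 16 ^ (k + 1) ≥ 16 := Nat.le_self_pow (by omega) 16
      omega
    rw [pvHex_big n h16]
    have : 16 ^ k ≤ n / 16 := by
      rw [Nat.le_div_iff_mul_le (by omega)]
      calc 16 ^ k * 16 = 16 ^ (k + 1) := by ring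
        _ ≤ n := hn
    have := ih (n / 16) this
    simp; omega

-- chunking explicit 2- and 4-char locations into byte pairs
lemma pvElems_two (a b : Char) :
    ((List.range 2).filter (fun j => j % 2 = 0)).map
        (fun j => String.mk (([a, b].drop j).take 2)) = [String.mk [a, b]] := rfl

lemma pvElems_four (a b c d : Char) :
    ((List.range 4).filter (fun j => j % 2 = 0)).map
        (fun j => String.mk (([a, b, c, d].drop j).take 2))
      = [String.mk [a, b], String.mk [c, d]] := rfl

lemma pvByte2_lo (s : Nat) :
    pvByte2 (s % 256) = String.mk [Nat.digitChar (s / 16 % 16), Nat.digitChar (s % 16)] := by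
  unfold pvByte2
  by_cases h : s % 256 < 16
  · rw [if_pos h, pvHex_small (s % 256) h]
    have h1 : s / 16 % 16 = 0 := by omega
    have h2 : s % 256 = s % 16 := by omega
    rw [h1, ← h2]; rfl
  · rw [if_neg h, pvHex2 (s % 256) (by omega) (by omega)]
    have h1 : s % 256 / 16 = s / 16 % 16 := by omega
    have h2 : s % 256 % 16 = s % 16 := by omega
    rw [h1, h2]

lemma pvEmit_eq (s : Nat) : pvEmitA s = pvEmitB s := by
  unfold pvEmitA pvEmitB
  by_cases h0 : s < 16
  · rw [pvHex_small s h0]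
    simp only [List.length_cons, List.length_nil]
    norm_num [pvElems_two]
    rw [if_neg (by omega), if_neg (by omega)]
    unfold pvByte2
    rw [if_pos h0, pvHex_small s h0]
  · by_cases h1 : s < 256
    · rw [pvHex2 s (by omega) h1]
      simp only [List.length_cons, List.length_nil]
      norm_num [pvElems_two]
      rw [if_neg (by omega), if_neg (by omega)]
      unfold pvByte2
      rw [if_neg h0, pvHex2 s (by omega) h1]
    · by_cases h2 : s < 4096
      · rw [pvHex3 s (by omega) h2]
        simp only [List.length_cons, List.length_nil]
        norm_num [pvElems_four]
        rw [if_neg (by omega), if_pos (by omega)]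
        rw [pvByte2_lo s]
        unfold pvByte2
        rw [if_pos (show s / 256 < 16 by omega), pvHex_small (s / 256) (by omega)]
      · by_cases h3 : s < 65536
        · rw [pvHex4 s (by omega) h3]
          simp only [List.length_cons, List.length_nil]
          norm_num [pvElems_four]
          rw [if_neg (by omega), if_pos (by omega)]
          rw [pvByte2_lo s]
          unfold pvByte2
          rw [if_neg (show ¬ s / 256 < 16 by omega),
            pvHex2 (s / 256) (by omega) (by omega)]
          have hh : s / 256 / 16 = s / 4096 := by omega
          rw [hh]
        · -- offset needs more than two bytes: both sides emit nothing
          have h16 : (16 : Nat) ^ 4 = 65536 := by norm_num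
          have hlen : 5 ≤ (pvHexChars s).length :=
            pvHexLen_ge 4 s (by rw [h16]; omega)
          have hpadlen : 5 ≤ (if (pvHexChars s).length % 2 ≠ 0 then '0' :: pvHexChars s
              else pvHexChars s).length := by
            split
            · simp only [List.length_cons]; omega
            · omega
          simp only [List.length_map, pvRange_filter_even_len]
          rw [if_pos (by omega), if_pos (by omega)]

lemma pvFoldlLen (pre : List (List String)) :
    pre.foldl (fun acc b => acc + b.length) 0 = (pre.map List.length).sum := by
  suffices h : ∀ a : Nat, pre.foldl (fun acc b => acc + b.length) a = a + (pre.map List.length).sum by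
    simpa using h 0
  induction pre with
  | nil => intro a; simp
  | cons l ls ih => intro a; simp [ih]; ring

lemma pvLoopA (lines : List (List String)) :
    ∀ (suf pre : List (List String)) (acc : List (List String)), lines = pre ++ suf →
      (PySem.List.enumerate suf (pre.length : Int)).foldl (pvStepA lines) acc
        = acc ++ pvRef pvEmitA ((pre.map List.length).sum) suf := by
  intro suf
  induction suf with
  | nil => intro pre acc _; simp [PySem.List.enumerate_nil, pvRef]
  | cons l ls ih =>
    intro pre acc hl
    rw [PySem.List.enumerate_cons, List.foldl_cons]
    have hstep : pvStepA lines acc ((pre.length : Int), l)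
        = acc ++ (if PySem.List.pyGetD l 0 "" = "5b" then pvEmitA ((pre.map List.length).sum) else []) := by
      unfold pvStepA pvEmitA
      dsimp only
      rw [PySem.List.slice_to_natCast, hl, List.take_left, pvFoldlLen]
      by_cases hc : PySem.List.pyGetD l 0 "" = "5b"
      · rw [if_pos hc, if_pos hc]
        split_ifs <;> simp
      · rw [if_neg hc, if_neg hc]; simp
    rw [hstep]
    have hlen : ((pre.length : Int) + 1) = (((pre ++ [l]).length : Nat) : Int) := by
      simp [List.length_append]; try omega
    rw [hlen, ih (pre ++ [l]) _ (by simpa using hl)]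
    have hsum : (((pre ++ [l]).map List.length).sum) = l.length + (pre.map List.length).sum := by
      simp; ring
    rw [hsum]
    simp [pvRef, List.append_assoc]

lemma pvLoopB (lines : List (List String)) (offsets : List Nat)
    (hoff : offsets = 0 :: pvScan 0 lines) :
    ∀ (suf pre : List (List String)) (acc : List (List String)), lines = pre ++ suf →
      (PySem.List.enumerate suf (pre.length : Int)).foldl (pvStepB offsets) acc
        = acc ++ pvRef pvEmitB ((pre.map List.length).sum) suf := by
  intro suf
  induction suf with
  | nil => intro pre acc _; simp [PySem.List.enumerate_nil, pvRef]
  | cons l ls ih =>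
    intro pre acc hl
    rw [PySem.List.enumerate_cons, List.foldl_cons]
    have hget : PySem.List.pyGetD offsets ((pre.length : Nat) : Int) 0 = (pre.map List.length).sum := by
      rw [PySem.List.pyGetD_natCast, hoff]
      rw [pvScan_getD lines 0 pre.length (by rw [hl]; simp)]
      rw [hl, List.take_left]
      simp
    have hstep : pvStepB offsets acc ((pre.length : Int), l)
        = acc ++ (if PySem.List.pyGetD l 0 "" = "5b" then pvEmitB ((pre.map List.length).sum) else []) := by
      unfold pvStepB pvEmitB
      dsimp only
      rw [hget]
      by_cases hc : PySem.List.pyGetD l 0 "" = "5b"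
      · rw [if_pos hc, if_pos hc]
        split_ifs <;> simp
      · rw [if_neg hc, if_neg hc]; simp
    rw [hstep]
    have hlen : ((pre.length : Int) + 1) = (((pre ++ [l]).length : Nat) : Int) := by
      simp [List.length_append]; try omega
    rw [hlen, ih (pre ++ [l]) _ (by simpa using hl)]
    have hsum : (((pre ++ [l]).map List.length).sum) = l.length + (pre.map List.length).sum := by
      simp; ring
    rw [hsum]
    simp [pvRef, List.append_assoc]

-- ===== VERDICT (by name: the statement is the Claim_ definition above) =====
theorem get_jumpdests_spec : Claim_equal_get_jumpdests := by
  intro lines _ _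
  unfold Spec_get_jumpdests get_jumpdests get_jumpdests_alt
  rw [show ((0 : Int)) = ((([] : List (List String)).length : Nat) : Int) from rfl]
  rw [pvLoopA lines lines [] [] rfl]
  rw [pvOffsets_eq lines [0] (by simp)]
  rw [pvLoopB lines _ (by simp) lines [] [] rfl]
  simp only [List.nil_append, List.map_nil, List.sum_nil]
  rw [show pvEmitA = pvEmitB from funext pvEmit_eq]
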